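-- pv_equiv track=rewrite | github.com/OLEGFOX1897/certification_one_PY_notes | work_list.py | sort_date
-- ===== SOURCE A (Python) =====
-- def sort_date(list):  # no realese
--     list_date=[]
--     for i in range(1,len(list),1):
--         list_date.append(list[i][1])
--     list_date_sort=sorted(list_date)
--     new_list=[]
--     for i in range(0,len(list_date_sort),1):
--         for j in range(0,len(list),1):
--             if list_date_sort[i]==list[j][1]:
--                 new_list.append(list[j])
--     return new_list
-- ===== SOURCE B (Python) =====
-- def sort_date(list):  # group rows by date once, then emit the group for each sorted tail date
--     if len(list) < 2:
--         return []
--     groups = {}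
--     for row in list:
--         groups.setdefault(row[1], []).append(row)
--     out = []
--     for d in sorted(row[1] for row in list[1:]):
--         out.extend(groups[d])
--     return out
-- ===== Notes on version B (the rewrite author's own statement) =====
-- stated objective: alternative
-- what changed: Replaces the nested rescan of the whole table per sorted date with a one-pass dict grouping rows by their date, then concatenates the group for each sorted tail date.
import Mathlib
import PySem

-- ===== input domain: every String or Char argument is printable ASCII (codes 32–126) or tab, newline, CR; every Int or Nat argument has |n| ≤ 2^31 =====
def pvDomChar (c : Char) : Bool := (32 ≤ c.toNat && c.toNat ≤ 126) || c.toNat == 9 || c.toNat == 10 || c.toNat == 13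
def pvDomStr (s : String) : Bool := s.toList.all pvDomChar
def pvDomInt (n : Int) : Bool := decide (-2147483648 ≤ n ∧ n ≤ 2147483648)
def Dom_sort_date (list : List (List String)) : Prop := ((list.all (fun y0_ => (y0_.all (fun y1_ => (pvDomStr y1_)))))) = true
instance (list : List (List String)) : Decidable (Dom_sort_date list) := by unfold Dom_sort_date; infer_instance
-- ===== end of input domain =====

-- B groups the rows by their date field in one pass over the table and then concatenates the
-- matching group for each sorted tail date, instead of A's rescan of the whole table per date.

-- ===== PORT A =====
def sort_date (list : List (List String)) : List (List String) :=
  -- list_date = [list[i][1] for i in range(1, len(list))]  (pyGetD is total; Pre_ keeps the accesses in range)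
  let list_date := (PySem.List.pyRange 1 (PySem.List.len list) 1).foldl
      (fun acc i => acc ++ [PySem.List.pyGetD (PySem.List.pyGetD list i []) 1 ""]) []
  let list_date_sort := PySem.List.sorted list_date (fun x => x) false
  (PySem.List.pyRange 0 (PySem.List.len list_date_sort) 1).foldl (fun acc i =>
    (PySem.List.pyRange 0 (PySem.List.len list) 1).foldl (fun acc2 j =>
      if PySem.List.pyGetD list_date_sort i "" = PySem.List.pyGetD (PySem.List.pyGetD list j []) 1 ""
      then acc2 ++ [PySem.List.pyGetD list j []] else acc2) acc) []

-- ===== PORT B =====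
def sort_date_alt (list : List (List String)) : List (List String) :=
  if list.length < 2 then []
  else
    -- groups.setdefault(row[1], []).append(row)
    let groups := list.foldl
      (fun g row => g.modify (PySem.List.pyGetD row 1 "") [] (fun v => v ++ [row])) PySem.Dict.empty
    let dates := PySem.List.sorted
      ((PySem.List.slice list (some 1) none).map (fun row => PySem.List.pyGetD row 1 "")) (fun x => x) false
    dates.foldl (fun out d => out ++ groups.getD d []) []

-- ===== PRECONDITION & SPEC =====
-- A raises IndexError on row[1] unless every row has at least two fields; with at most one row, no row is indexed.
def Pre_sort_date (list : List (List String)) : Prop :=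
  list.length ≤ 1 ∨ ∀ row ∈ list, 2 ≤ row.length
instance (list : List (List String)) : Decidable (Pre_sort_date list) := by unfold Pre_sort_date; infer_instance
def pvWitness_sort_date : List (List String) := [["name", "2020"], ["n2", "2019"], ["n3", "2021"]]
def Spec_sort_date (list : List (List String)) (out : List (List String)) : Prop := out = sort_date_alt list
instance (list : List (List String)) (out : List (List String)) : Decidable (Spec_sort_date list out) := by unfold Spec_sort_date; infer_instance

-- ===== CLAIM (what is proved, stated in full; the proofs are below) =====
def Claim_equal_sort_date : Prop := ∀ (list : List (List String)), Dom_sort_date list → Pre_sort_date list → Spec_sort_date list (sort_date list)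

-- ===== LEMMAS AND PROOFS =====

-- the date-key of a row, list[j][1] with a total default
def pvKey (row : List String) : String := PySem.List.pyGetD row 1 ""

-- A's first loop builds the keys of the tail rows
theorem pv_list_date_eq (list : List (List String)) :
    ((PySem.List.pyRange 1 (PySem.List.len list) 1).foldl
      (fun acc i => acc ++ [PySem.List.pyGetD (PySem.List.pyGetD list i []) 1 ""]) [])
    = (list.drop 1).map pvKey := by
  rw [PySem.List.foldl_pyRange_pyGetD (a := 1) (d := []) (xs := list)
      (f := fun acc r => acc ++ [PySem.List.pyGetD r 1 ""]) (init := []) (by norm_num)]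
  rw [PySem.List.foldl_append_singleton_eq_map]
  rfl

-- A's nested loops are a flatMap of filters over the sorted keys
theorem pv_double_loop_eq (list : List (List String)) (S : List String) :
    ((PySem.List.pyRange 0 (PySem.List.len S) 1).foldl (fun acc i =>
      (PySem.List.pyRange 0 (PySem.List.len list) 1).foldl (fun acc2 j =>
        if PySem.List.pyGetD S i "" = PySem.List.pyGetD (PySem.List.pyGetD list j []) 1 ""
        then acc2 ++ [PySem.List.pyGetD list j []] else acc2) acc) [])
    = S.flatMap (fun d => list.filter (fun r => decide (d = pvKey r))) := by
  rw [PySem.List.foldl_pyRange_pyGetD (a := 0) (d := "") (xs := S)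
      (f := fun acc dd => (PySem.List.pyRange 0 (PySem.List.len list) 1).foldl (fun acc2 j =>
        if dd = PySem.List.pyGetD (PySem.List.pyGetD list j []) 1 ""
        then acc2 ++ [PySem.List.pyGetD list j []] else acc2) acc) (init := []) (by norm_num)]
  simp only [Int.toNat_zero, List.drop_zero]
  have hinner : ∀ (acc : List (List String)) (dd : String),
      ((PySem.List.pyRange 0 (PySem.List.len list) 1).foldl (fun acc2 j =>
        if dd = PySem.List.pyGetD (PySem.List.pyGetD list j []) 1 ""
        then acc2 ++ [PySem.List.pyGetD list j []] else acc2) acc)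
      = acc ++ list.filter (fun r => decide (dd = pvKey r)) := by
    intro acc dd
    rw [PySem.List.foldl_pyRange_pyGetD (a := 0) (d := []) (xs := list)
        (f := fun acc2 r => if dd = PySem.List.pyGetD r 1 "" then acc2 ++ [r] else acc2) (init := acc) (by norm_num)]
    simp only [Int.toNat_zero, List.drop_zero]
    rw [PySem.List.foldl_append_ite_eq_filter]
    rfl
  simp only [hinner]
  rw [PySem.List.foldl_append_eq_flatMap]
  simp

theorem sort_date_eq_flatMap (list : List (List String)) :
    sort_date list =
      (PySem.List.sorted ((list.drop 1).map pvKey) (fun x => x) false).flatMap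
        (fun d => list.filter (fun r => decide (d = pvKey r))) := by
  unfold sort_date
  rw [pv_list_date_eq, pv_double_loop_eq]

-- B's grouping dict looked up at a key is the filter of the table by that key
theorem pv_groups_getD (list : List (List String)) (d : String) :
    (list.foldl (fun g row => g.modify (pvKey row) [] (fun v => v ++ [row])) PySem.Dict.empty).getD d []
    = list.filter (fun r => decide (d = pvKey r)) := by
  have h : list.foldl (fun g row => g.modify (pvKey row) [] (fun v => v ++ [row])) PySem.Dict.empty
      = (list.map (fun r => (pvKey r, r))).foldl (fun g p => g.modify p.1 [] (fun v => v ++ [p.2])) PySem.Dict.empty := by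
    rw [List.foldl_map]
  rw [h, PySem.Dict.getD_foldl_modify_append, PySem.Dict.getD_empty, List.nil_append,
      List.filter_map (f := fun r => (pvKey r, r)) (p := fun p => p.1 == d)]
  have hp : ((fun p : String × List String => p.1 == d) ∘ (fun r => (pvKey r, r)))
      = (fun r => decide (d = pvKey r)) := by
    funext r; by_cases hh : d = pvKey r <;> simp [Function.comp, hh, Ne.symm]
  rw [hp]
  simp [Function.comp_def]

theorem sort_date_alt_eq_flatMap (list : List (List String)) (h : 2 ≤ list.length) :
    sort_date_alt list =
      (PySem.List.sorted ((list.drop 1).map pvKey) (fun x => x) false).flatMap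
        (fun d => list.filter (fun r => decide (d = pvKey r))) := by
  unfold sort_date_alt
  rw [if_neg (by omega)]
  rw [PySem.List.slice_from _ (by norm_num), show (1:Int).toNat = 1 from rfl]
  rw [PySem.List.foldl_append_eq_flatMap, List.nil_append]
  congr 1
  funext d
  exact pv_groups_getD list d

-- ===== VERDICT (by name: the statement is the Claim_ definition above) =====
theorem sort_date_spec : Claim_equal_sort_date := by
  intro list _ _
  show sort_date list = sort_date_alt list
  by_cases h : list.length < 2
  · have hd : list.drop 1 = [] := List.drop_eq_nil_of_le (by omega)
    rw [sort_date_eq_flatMap, hd]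
    unfold sort_date_alt
    rw [if_pos h]
    simp [show PySem.List.sorted ([] : List String) (fun x => x) false = [] from rfl]
  · rw [sort_date_eq_flatMap, sort_date_alt_eq_flatMap list (by omega)]
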